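-- pv_equiv track=rewrite | github.com/Jonathanseng/Number-Theory | 46. Euler's Totient Function and Powers of Primes.py | powers_of_primes
-- ===== SOURCE A (Python) =====
-- import math
--
-- def powers_of_primes(n):
--   """
--   Calculates the powers of primes up to a given number n.
--
--   Args:
--     n: The number to calculate the powers of primes for.
--
--   Returns:
--     A list of the powers of primes up to n.
--   """
--   powers = []
--   for i in range(2, n + 1):
--     power = 1
--     while i % 2 == 0:
--       power *= 2
--       i //= 2
--     for p in range(3, int(math.sqrt(i)) + 1, 2):
--       while i % p == 0:
--         power *= p
--         i //= p
--     if i > 1: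
--       power *= i
--     powers.append(power)
--   return powers
-- ===== SOURCE B (Python) =====
-- def powers_of_primes(n):
--   # The product of all prime factors (with multiplicity) of i is i itself,
--   # so the list is just 2..n.
--   return list(range(2, n + 1))
-- ===== Notes on version B (the rewrite author's own statement) =====
-- stated objective: faster
-- what changed: A trial-divides each i in 2..n and multiplies its prime factors back together, which always reconstructs i; B returns range(2, n+1) directly with no factorization.
import Mathlib
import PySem

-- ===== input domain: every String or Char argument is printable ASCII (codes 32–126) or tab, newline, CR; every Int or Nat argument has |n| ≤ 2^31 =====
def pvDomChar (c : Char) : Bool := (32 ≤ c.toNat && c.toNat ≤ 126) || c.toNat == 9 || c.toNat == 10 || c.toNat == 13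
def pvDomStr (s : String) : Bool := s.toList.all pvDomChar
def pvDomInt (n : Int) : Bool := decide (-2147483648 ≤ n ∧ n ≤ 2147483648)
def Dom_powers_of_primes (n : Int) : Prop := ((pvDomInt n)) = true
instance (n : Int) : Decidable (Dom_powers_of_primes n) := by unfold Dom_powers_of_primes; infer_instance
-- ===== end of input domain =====

-- B replaces A's per-element trial-division factorization (whose factor product is always the
-- element itself) by the range 2..n directly; objective: faster.

-- ===== PORT A =====
-- 'while i % p == 0: power *= p; i //= p'; the dependent guard only makes the recursion total
-- (it always holds when the Python loop runs: p is 2 or an odd p ≥ 3, and i ≥ 1 throughout).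
def stripA (p power i : Int) : Int × Int :=
  if h : 2 ≤ p ∧ 1 ≤ i ∧ PySem.Int.mod i p = 0 then
    stripA p (power * p) (PySem.Int.floordiv i p)
  else (power, i)
termination_by i.toNat
decreasing_by
  obtain ⟨hp, hi, hm⟩ := h
  rw [PySem.Int.floordiv_eq_ediv_of_pos (by omega)]
  have : i / p < i := Int.ediv_lt_of_lt_mul (by omega) (by nlinarith)
  have : 0 ≤ i / p := Int.ediv_nonneg (by omega) (by omega)
  omega

def powers_of_primes (n : Int) : List Int :=
  (PySem.List.pyRange 2 (n + 1) 1).foldl (fun powers i =>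
    -- power = 1; while i % 2 == 0: power *= 2; i //= 2
    let s1 := stripA 2 1 i
    -- int(math.sqrt(i)): exact integer sqrt of the (reduced) i — for 0 ≤ i ≤ 2^31 the float
    -- computation int(math.sqrt(i)) equals the integer square root, ported as Nat.sqrt
    let bound : Int := ((Int.toNat s1.2).sqrt : Int)
    -- for p in range(3, int(math.sqrt(i)) + 1, 2): while i % p == 0: …
    let s2 := (PySem.List.pyRange 3 (bound + 1) 2).foldl (fun s p => stripA p s.1 s.2) s1
    -- if i > 1: power *= i; powers.append(power)
    powers ++ [if s2.2 > 1 then s2.1 * s2.2 else s2.1]) []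

-- ===== PORT B =====
def powers_of_primes_alt (n : Int) : List Int := PySem.List.pyRange 2 (n + 1) 1

-- ===== PRECONDITION & SPEC =====
def Spec_powers_of_primes (n : Int) (out : List Int) : Prop := out = powers_of_primes_alt n
instance (n : Int) (out : List Int) : Decidable (Spec_powers_of_primes n out) := by unfold Spec_powers_of_primes; infer_instance

-- ===== CLAIM (what is proved, stated in full; the proofs are below) =====
def Claim_equal_powers_of_primes : Prop := ∀ (n : Int), Dom_powers_of_primes n → Spec_powers_of_primes n (powers_of_primes n)

-- ===== LEMMAS AND PROOFS =====

-- stripping divides-out loop invariant: power * i is preserved and i stays ≥ 1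
theorem stripA_spec (p power i : Int) (hi : 1 ≤ i) :
    (stripA p power i).1 * (stripA p power i).2 = power * i ∧ 1 ≤ (stripA p power i).2 := by
  fun_induction stripA p power i with
  | case1 power i h ih =>
    obtain ⟨hp, hi', hm⟩ := h
    have hdvd : p ∣ i := (PySem.Int.mod_eq_zero_iff_dvd i p).mp hm
    have hle : p ≤ i := Int.le_of_dvd (by omega) hdvd
    have h1 : 1 ≤ PySem.Int.floordiv i p := by
      rw [PySem.Int.floordiv_eq_ediv_of_pos (by omega)]
      exact Int.le_ediv_iff_mul_le (by omega) |>.mpr (by omega)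
    obtain ⟨ihe, ihp⟩ := ih h1
    refine ⟨?_, ihp⟩
    rw [ihe, PySem.Int.floordiv_eq_ediv_of_pos (by omega),
        mul_assoc, mul_comm p, Int.ediv_mul_cancel hdvd]
  | case2 power i h => exact ⟨rfl, hi⟩

-- the inner 'for p' fold preserves the same invariant
theorem fold_strip_spec (ps : List Int) (s : Int × Int) (hs : 1 ≤ s.2) :
    (ps.foldl (fun s p => stripA p s.1 s.2) s).1 * (ps.foldl (fun s p => stripA p s.1 s.2) s).2
      = s.1 * s.2 ∧ 1 ≤ (ps.foldl (fun s p => stripA p s.1 s.2) s).2 := by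
  induction ps generalizing s with
  | nil => exact ⟨rfl, hs⟩
  | cons p ps ih =>
    obtain ⟨he, hp⟩ := stripA_spec p s.1 s.2 hs
    obtain ⟨ihe, ihp⟩ := ih (stripA p s.1 s.2) hp
    exact ⟨by simp only [List.foldl_cons] at *; rw [ihe, he], by simpa using ihp⟩

-- A's loop body appends exactly i, for every i ≥ 1
theorem body_eq (i : Int) (hi : 1 ≤ i) :
    (let s1 := stripA 2 1 i
     let bound : Int := ((Int.toNat s1.2).sqrt : Int)
     let s2 := (PySem.List.pyRange 3 (bound + 1) 2).foldl (fun s p => stripA p s.1 s.2) s1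
     if s2.2 > 1 then s2.1 * s2.2 else s2.1) = i := by
  obtain ⟨h1e, h1p⟩ := stripA_spec 2 1 i hi
  obtain ⟨h2e, h2p⟩ := fold_strip_spec _ (stripA 2 1 i) h1p
  simp only
  split_ifs with h
  · rw [h2e, h1e, one_mul]
  · have : (((PySem.List.pyRange 3 (((Int.toNat (stripA 2 1 i).2).sqrt : Int) + 1) 2).foldl
        (fun s p => stripA p s.1 s.2) (stripA 2 1 i))).2 = 1 := by omega
    have h' := h2e
    rw [this, mul_one, h1e, one_mul] at h'
    exact h'

-- ===== VERDICT (by name: the statement is the Claim_ definition above) =====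
theorem powers_of_primes_spec : Claim_equal_powers_of_primes := by
  intro n _
  unfold Spec_powers_of_primes powers_of_primes powers_of_primes_alt
  have : ∀ i ∈ PySem.List.pyRange 2 (n + 1) 1, (1 : Int) ≤ i := by
    intro i h
    have := (PySem.List.mem_pyRange_one).mp h
    omega
  calc (PySem.List.pyRange 2 (n + 1) 1).foldl (fun powers i =>
        let s1 := stripA 2 1 i
        let bound : Int := ((Int.toNat s1.2).sqrt : Int)
        let s2 := (PySem.List.pyRange 3 (bound + 1) 2).foldl (fun s p => stripA p s.1 s.2) s1
        powers ++ [if s2.2 > 1 then s2.1 * s2.2 else s2.1]) []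
      = (PySem.List.pyRange 2 (n + 1) 1).foldl (fun powers i => powers ++ [i]) [] := by
        apply PySem.List.foldl_congr_mem
        intro acc i hmem
        simp only
        rw [body_eq i (this i hmem)]
    _ = PySem.List.pyRange 2 (n + 1) 1 := by
        rw [PySem.List.foldl_append_singleton_eq_self]; simp
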